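-- pv_equiv track=rewrite | github.com/YourgrandpaNA/apm466-a1 | a1.2.py | get_ordered_list
-- ===== SOURCE A (Python) =====
-- def get_ordered_list(l):
--     i = 0
--     final_lst = []
--     while i < 4:
--         ls = []
--         j = 0
--         while j < len(l):
--             num = l[j][i]
--             ls.append(num)
--             j += 1
--         final_lst.append(ls)
--         i += 1
--     return final_lst
-- ===== SOURCE B (Python) =====
-- def get_ordered_list(l):
--     c0, c1, c2, c3 = [], [], [], []
--     for row in l:
--         c0.append(row[0])
--         c1.append(row[1])
--         c2.append(row[2])
--         c3.append(row[3])
--     return [c0, c1, c2, c3]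
-- ===== Notes on version B (the rewrite author's own statement) =====
-- stated objective: simpler
-- what changed: Replaces four column-major passes over the rows (one per column index) with a single row-major pass that appends each row's first four elements to four accumulator lists.
import Mathlib
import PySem

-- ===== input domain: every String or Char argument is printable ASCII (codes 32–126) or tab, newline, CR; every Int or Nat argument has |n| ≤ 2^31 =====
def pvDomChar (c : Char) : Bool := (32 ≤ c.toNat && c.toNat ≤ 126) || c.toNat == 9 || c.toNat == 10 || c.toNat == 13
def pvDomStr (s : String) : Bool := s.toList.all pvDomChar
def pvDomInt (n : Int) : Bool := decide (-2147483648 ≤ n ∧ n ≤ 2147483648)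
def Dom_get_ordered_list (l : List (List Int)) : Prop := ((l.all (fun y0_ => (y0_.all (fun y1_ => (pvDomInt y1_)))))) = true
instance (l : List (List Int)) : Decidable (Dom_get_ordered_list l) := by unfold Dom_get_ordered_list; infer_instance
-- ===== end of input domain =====

-- B replaces A's four column-major passes with one row-major pass over four accumulators (objective: simpler).

-- ===== PORT A =====
-- four column passes: for i in range(4), scan all rows j collecting l[j][i]
def get_ordered_list (l : List (List Int)) : List (List Int) :=
  (PySem.List.pyRange 0 4 1).foldl (fun final_lst i =>
    final_lst ++
      [(PySem.List.pyRange 0 (l.length : Int) 1).foldl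
        (fun ls j => ls ++ [PySem.List.pyGetD (PySem.List.pyGetD l j []) i 0]) []]) []

-- ===== PORT B =====
-- one row pass: append row[0..3] to the four accumulator lists
def pvColStep (acc : List Int × List Int × List Int × List Int) (row : List Int) :
    List Int × List Int × List Int × List Int :=
  (acc.1 ++ [PySem.List.pyGetD row 0 0],
   acc.2.1 ++ [PySem.List.pyGetD row 1 0],
   acc.2.2.1 ++ [PySem.List.pyGetD row 2 0],
   acc.2.2.2 ++ [PySem.List.pyGetD row 3 0])

def get_ordered_list_alt (l : List (List Int)) : List (List Int) :=
  let r := l.foldl pvColStep ([], [], [], [])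
  [r.1, r.2.1, r.2.2.1, r.2.2.2]

-- ===== PRECONDITION & SPEC =====
-- Pre_ excludes exactly the inputs where Python A raises IndexError: a row with fewer than 4 elements.
def Pre_get_ordered_list (l : List (List Int)) : Prop := ∀ r ∈ l, 4 ≤ r.length
instance (l : List (List Int)) : Decidable (Pre_get_ordered_list l) := by unfold Pre_get_ordered_list; infer_instance
def pvWitness_get_ordered_list : List (List Int) := [[1, 2, 3, 4], [5, 6, 7, 8]]
def Spec_get_ordered_list (l : List (List Int)) (out : List (List Int)) : Prop := out = get_ordered_list_alt l
instance (l : List (List Int)) (out : List (List Int)) : Decidable (Spec_get_ordered_list l out) := by unfold Spec_get_ordered_list; infer_instance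

-- ===== CLAIM (what is proved, stated in full; the proofs are below) =====
def Claim_equal_get_ordered_list : Prop := ∀ (l : List (List Int)), Dom_get_ordered_list l → Pre_get_ordered_list l → Spec_get_ordered_list l (get_ordered_list l)

-- ===== LEMMAS AND PROOFS =====

-- B's fold keeps four columns: close it with map over the rows
theorem pvFoldColStep (l : List (List Int)) (a b c d : List Int) :
    l.foldl pvColStep (a, b, c, d) =
      (a ++ l.map (fun r => PySem.List.pyGetD r 0 0),
       b ++ l.map (fun r => PySem.List.pyGetD r 1 0),
       c ++ l.map (fun r => PySem.List.pyGetD r 2 0),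
       d ++ l.map (fun r => PySem.List.pyGetD r 3 0)) := by
  induction l generalizing a b c d with
  | nil => simp
  | cons r t ih => simp [pvColStep, ih]

-- A's inner column loop is a map over the rows
theorem pvInnerLoop (l : List (List Int)) (i : Int) :
    (PySem.List.pyRange 0 (l.length : Int) 1).foldl
        (fun ls j => ls ++ [PySem.List.pyGetD (PySem.List.pyGetD l j []) i 0]) []
      = l.map (fun r => PySem.List.pyGetD r i 0) := by
  rw [PySem.List.foldl_pyRange_zero_pyGetD' l [] (fun ls r => ls ++ [PySem.List.pyGetD r i 0]) []]
  simpa using PySem.List.foldl_append_singleton_eq_map (fun r => PySem.List.pyGetD r i 0) l []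

-- ===== VERDICT (by name: the statement is the Claim_ definition above) =====
theorem get_ordered_list_spec : Claim_equal_get_ordered_list := by
  intro l _ _
  unfold Spec_get_ordered_list get_ordered_list get_ordered_list_alt
  rw [show PySem.List.pyRange 0 4 1 = [0, 1, 2, 3] by decide]
  simp only [List.foldl, List.nil_append]
  rw [pvInnerLoop l 0, pvInnerLoop l 1, pvInnerLoop l 2, pvInnerLoop l 3, pvFoldColStep]
  simp
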